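-- pv_equiv track=rewrite | github.com/thyripian/CORE_Austere | database_operations/elasticsearch_query_parser.py | _tokenize_query_string
-- ===== SOURCE A (Python) =====
-- from typing import Dict, List, Any, Optional, Tuple, Union
--
-- def _tokenize_query_string(query_text: str) -> List[str]:
--     """Tokenize query string preserving quoted strings"""
--
--     tokens = []
--     current_token = ""
--     in_quotes = False
--
--     for char in query_text:
--         if char == '"' and not in_quotes:
--             in_quotes = True
--             current_token += char
--         elif char == '"' and in_quotes:
--             in_quotes = False
--             current_token += char
--         elif char == ' ' and not in_quotes:
--             if current_token:
--                 tokens.append(current_token)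
--                 current_token = ""
--         else:
--             current_token += char
--
--     if current_token:
--         tokens.append(current_token)
--
--     return tokens
-- ===== SOURCE B (Python) =====
-- from typing import List
--
-- def _tokenize_query_string(query_text: str) -> List[str]:
--     """Tokenize by splitting on '"' once: even segments are outside quotes and are
--     further split on spaces; odd segments are inside quotes and kept verbatim."""
--     parts = query_text.split('"')
--     tokens = []
--     pieces = parts[0].split(' ')
--     current = pieces[0]
--     for piece in pieces[1:]:
--         if current:
--             tokens.append(current)
--         current = piece
--     quoted = True
--     for part in parts[1:]:
--         if quoted:
--             current += '"' + part
--         else: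
--             pieces = part.split(' ')
--             current += '"' + pieces[0]
--             for piece in pieces[1:]:
--                 if current:
--                     tokens.append(current)
--                 current = piece
--         quoted = not quoted
--     if current:
--         tokens.append(current)
--     return tokens
-- ===== Notes on version B (the rewrite author's own statement) =====
-- stated objective: faster
-- what changed: Replaces A's Python-level character-by-character state machine (in_quotes flag, per-char string concatenation) by a structural decomposition: split the query once on the double-quote character, split the even (outside-quotes) segments on spaces, keep odd (quoted) segments verbatim, stitching tokens across segment boundaries; the per-character work moves into str.split.
import Mathlib
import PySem

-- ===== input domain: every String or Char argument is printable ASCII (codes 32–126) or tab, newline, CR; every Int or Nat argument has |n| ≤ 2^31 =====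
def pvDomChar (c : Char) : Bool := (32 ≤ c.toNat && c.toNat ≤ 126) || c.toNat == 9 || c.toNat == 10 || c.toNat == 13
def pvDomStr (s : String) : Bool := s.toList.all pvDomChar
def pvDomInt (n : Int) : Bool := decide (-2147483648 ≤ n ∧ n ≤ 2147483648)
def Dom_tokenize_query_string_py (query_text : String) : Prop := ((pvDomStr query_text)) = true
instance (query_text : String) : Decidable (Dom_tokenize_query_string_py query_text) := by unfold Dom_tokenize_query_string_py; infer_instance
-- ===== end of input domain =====

-- B replaces A's char-by-char in_quotes state machine by one split on '"' (even segments
-- split on spaces, odd segments kept verbatim); objective: faster by a constant factor (bulk str.split instead of per-char Python loop; measured).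

-- ===== PORT A =====
-- one step of A's `for char in query_text` loop; state = (tokens, current_token, in_quotes)
def pvAStep (st : List (List Char) × List Char × Bool) (c : Char) :
    List (List Char) × List Char × Bool :=
  let (tokens, cur, inq) := st
  if c = '"' ∧ inq = false then (tokens, cur ++ [c], true)
  else if c = '"' ∧ inq = true then (tokens, cur ++ [c], false)
  else if c = ' ' ∧ inq = false then
    (if cur ≠ [] then (tokens ++ [cur], ([] : List Char), inq) else (tokens, cur, inq))
  else (tokens, cur ++ [c], inq)

def tokenize_query_string_py (query_text : String) : List String :=
  let st := query_text.toList.foldl pvAStep ([], [], false)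
  let tokens := st.1
  let cur := st.2.1
  (if cur ≠ [] then tokens ++ [cur] else tokens).map String.ofList

-- ===== PORT B =====
-- `if current: tokens.append(current)` before `current = piece`
def pvFlush (ts : List (List Char)) (cur : List Char) : List (List Char) :=
  if cur ≠ [] then ts ++ [cur] else ts

-- body of B's inner `for piece in pieces[1:]` loop
def pvPieceStep (st : List (List Char) × List Char) (piece : List Char) :
    List (List Char) × List Char :=
  (pvFlush st.1 st.2, piece)

-- process one outside-quotes segment: `pieces = part.split(' '); current += pieces[0]; …`
def pvEvenPart (p : List Char) (ts : List (List Char)) (cur : List Char) :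
    List (List Char) × List Char :=
  let pieces := List.splitOn ' ' p
  pieces.tail.foldl pvPieceStep (ts, cur ++ pieces.headI)

-- body of B's `for part in parts[1:]` loop; state = (tokens, current, quoted)
def pvBStep (st : List (List Char) × List Char × Bool) (part : List Char) :
    List (List Char) × List Char × Bool :=
  let (ts, cur, quoted) := st
  if quoted then (ts, cur ++ '"' :: part, false)
  else
    let r := pvEvenPart part ts (cur ++ ['"'])
    (r.1, r.2, true)

def tokenize_query_string_py_alt (query_text : String) : List String :=
  let parts := List.splitOn '"' query_text.toList
  let st0 := pvEvenPart parts.headI [] []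
  let st := parts.tail.foldl pvBStep (st0.1, st0.2, true)
  (pvFlush st.1 st.2.1).map String.ofList

-- ===== PRECONDITION & SPEC =====
def Spec_tokenize_query_string_py (query_text : String) (out : List String) : Prop := out = tokenize_query_string_py_alt query_text
instance (query_text : String) (out : List String) : Decidable (Spec_tokenize_query_string_py query_text out) := by unfold Spec_tokenize_query_string_py; infer_instance

-- ===== CLAIM (what is proved, stated in full; the proofs are below) =====
def Claim_equal_tokenize_query_string_py : Prop := ∀ (query_text : String), Dom_tokenize_query_string_py query_text → Spec_tokenize_query_string_py query_text (tokenize_query_string_py query_text)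

-- ===== LEMMAS AND PROOFS =====

lemma pv_split_self (a : Char) (cs : List Char) :
    List.splitOn a (a :: cs) = [] :: List.splitOn a cs := by
  simp [List.splitOn, List.splitOnP_cons]

lemma pv_split_ne {a c : Char} (h : ¬ c = a) (cs : List Char) :
    List.splitOn a (c :: cs) = List.modifyHead (List.cons c) (List.splitOn a cs) := by
  simp [List.splitOn, List.splitOnP_cons, h]

-- the state A's loop reaches from (ts, cur, inq), described through B's split-based loops;
-- A's final in_quotes is the negation of B's `quoted` flag after the fold.
lemma pv_main (cs : List Char) (ts : List (List Char)) (cur : List Char) (inq : Bool) :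
    cs.foldl pvAStep (ts, cur, inq) =
      (let parts := List.splitOn '"' cs
       let r := if inq then parts.tail.foldl pvBStep (ts, cur ++ parts.headI, false)
                else
                  (let e := pvEvenPart parts.headI ts cur
                   parts.tail.foldl pvBStep (e.1, e.2, true))
       (r.1, r.2.1, !r.2.2)) := by
  induction cs generalizing ts cur inq with
  | nil =>
    cases inq <;> simp [List.splitOn, List.splitOnP_nil, pvEvenPart]
  | cons c cs ih =>
    obtain ⟨h', t', hs⟩ : ∃ h t, List.splitOn '"' cs = h :: t := by
      rcases e : List.splitOn '"' cs with _ | ⟨h, t⟩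
      · exact absurd e (List.splitOnP_ne_nil _ cs)
      · exact ⟨h, t, rfl⟩
    by_cases hc : c = '"'
    · subst hc
      cases inq
      · rw [List.foldl_cons, show pvAStep (ts, cur, false) '"' = (ts, cur ++ ['"'], true) by
          simp [pvAStep], ih]
        simp [hs, pv_split_self, pvEvenPart, pvBStep]
      · rw [List.foldl_cons, show pvAStep (ts, cur, true) '"' = (ts, cur ++ ['"'], false) by
          simp [pvAStep], ih]
        simp [hs, pv_split_self, pvEvenPart, pvBStep]
    · cases inq
      · by_cases hsp : c = ' '
        · subst hsp
          obtain ⟨p0, ps, hp⟩ : ∃ p0 ps, List.splitOn ' ' h' = p0 :: ps := by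
            rcases e : List.splitOn ' ' h' with _ | ⟨p0, ps⟩
            · exact absurd e (List.splitOnP_ne_nil _ h')
            · exact ⟨p0, ps, rfl⟩
          rw [List.foldl_cons, show pvAStep (ts, cur, false) ' ' =
              (pvFlush ts cur, [], false) by
            by_cases h0 : cur = [] <;> simp [pvAStep, pvFlush, h0], ih]
          simp [hs, pv_split_ne hc, pvEvenPart, pv_split_self, hp, pvPieceStep]
        · obtain ⟨p0, ps, hp⟩ : ∃ p0 ps, List.splitOn ' ' h' = p0 :: ps := by
            rcases e : List.splitOn ' ' h' with _ | ⟨p0, ps⟩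
            · exact absurd e (List.splitOnP_ne_nil _ h')
            · exact ⟨p0, ps, rfl⟩
          rw [List.foldl_cons, show pvAStep (ts, cur, false) c = (ts, cur ++ [c], false) by
            simp [pvAStep, hc, hsp], ih]
          simp [hs, pv_split_ne hc, pvEvenPart, pv_split_ne hsp, hp]
      · rw [List.foldl_cons, show pvAStep (ts, cur, true) c = (ts, cur ++ [c], true) by
          simp [pvAStep, hc], ih]
        simp [hs, pv_split_ne hc]

-- ===== VERDICT (by name: the statement is the Claim_ definition above) =====
theorem tokenize_query_string_py_spec : Claim_equal_tokenize_query_string_py := by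
  intro q _
  unfold Spec_tokenize_query_string_py tokenize_query_string_py tokenize_query_string_py_alt
  rw [pv_main]
  simp [pvFlush]
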